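-- pv_equiv track=rewrite | github.com/karimsaqer/RSA_python | RSA.py | encoding_plaintext
-- ===== SOURCE A (Python) =====
-- def encode_text(the_character):
--     if the_character.isdigit():
--         return int(the_character)
--     elif the_character.isspace():
--         return 36
--     elif the_character.isalpha():
--         return ord(the_character) - ord('a') + 10
--     else: # Just if there is exception case
--         return 36
--
-- def encoding_plaintext(plaintext):
--     # Convert plaintext to lower case to Get The Order function
--     plaintext = plaintext.lower()
--
--     # Make sure that the plaintext is five letters
--     # if len(plaintext) % 5 != 0:
--     while len(plaintext) % 5 != 0:
--         plaintext += ' '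
--
--     # Encoding every group of characters (5) and add it to array
--     numbers = []
--     for i in range(0, len(plaintext), 5):
--         group_of_five_chars = plaintext[i:i+5]
--         # The Sum
--         num = sum(encode_text(c) * (37 ** (4 - i)) for i, c in enumerate(group_of_five_chars))
--         # Appending
--         numbers.append(num)
--     return numbers
-- ===== SOURCE B (Python) =====
-- def encode_text(the_character):
--     if the_character.isdigit():
--         return int(the_character)
--     elif the_character.isspace():
--         return 36
--     elif the_character.isalpha():
--         return ord(the_character) - ord('a') + 10
--     else: # Just if there is exception case
--         return 36
--
-- def _encode_group(group):
--     # Horner evaluation of the base-37 polynomial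
--     num = 0
--     for c in group:
--         num = num * 37 + encode_text(c)
--     return num
--
-- def encoding_plaintext(plaintext):
--     s = plaintext.lower()
--     s += ' ' * (-len(s) % 5)          # pad to a multiple of 5 in one step
--     return [_encode_group(s[i:i+5]) for i in range(0, len(s), 5)]
-- ===== Notes on version B (the rewrite author's own statement) =====
-- stated objective: idiomatic
-- what changed: Replaces the per-character power-weighted sum (37**(4-i) per term) with Horner evaluation using a single running accumulator, and replaces the while-loop padding with a one-step ' ' * (-len % 5) pad plus a list comprehension over the 5-char slices.
import Mathlib
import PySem

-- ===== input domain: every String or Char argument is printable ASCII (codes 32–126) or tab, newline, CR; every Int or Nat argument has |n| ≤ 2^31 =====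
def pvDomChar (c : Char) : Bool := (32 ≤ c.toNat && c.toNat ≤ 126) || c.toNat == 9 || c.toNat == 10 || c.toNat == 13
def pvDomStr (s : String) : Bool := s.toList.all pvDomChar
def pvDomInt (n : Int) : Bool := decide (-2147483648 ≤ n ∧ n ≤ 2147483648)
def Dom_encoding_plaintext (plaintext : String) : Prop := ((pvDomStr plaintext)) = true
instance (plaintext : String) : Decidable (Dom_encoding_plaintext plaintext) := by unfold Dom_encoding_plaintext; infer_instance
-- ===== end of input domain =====

-- B replaces the power-weighted per-character sum with Horner evaluation and the
-- while-padding loop with a one-step closed-form pad; same return value (idiomatic rewrite).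


-- ===== PORT A =====
-- shared module helper encode_text; int(c) for a single ASCII digit is c.toNat - 48 (exact on ASCII)
def encode_text (c : Char) : Int :=
  if PySem.Chars.isdigit c then ((c.toNat : Int) - 48)
  else if PySem.Chars.isspace c then 36
  else if PySem.Chars.isalpha c then ((c.toNat : Int) - 97 + 10)
  else 36

-- the while-loop 'while len % 5 != 0: plaintext += " "'; structural recursion on a fuel
-- bound (5 suffices: at most 4 spaces are ever appended) only to make the loop total
def padWhile (fuel : Nat) (s : List Char) : List Char :=
  match fuel with
  | 0 => s
  | fuel + 1 => if s.length % 5 ≠ 0 then padWhile fuel (s ++ [' ']) else s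

-- 37 ** (4 - i): exponent is nonnegative since every group has ≤ 5 characters (exact here)
def encoding_plaintext (plaintext : String) : List Int :=
  let p := padWhile 5 (PySem.Chars.lower plaintext.toList)
  (PySem.List.pyRange 0 (PySem.List.len p) 5).foldl
    (fun numbers i =>
      let group := PySem.List.slice p (some i) (some (i + 5))
      let num := ((PySem.List.enumerate group 0).map
        (fun ic => encode_text ic.2 * (37 : Int) ^ (4 - ic.1).toNat)).sum
      numbers ++ [num]) []

-- ===== PORT B =====
def encodeGroup (g : List Char) : Int :=
  g.foldl (fun num c => num * 37 + encode_text c) 0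

def encoding_plaintext_alt (plaintext : String) : List Int :=
  let s0 := PySem.Chars.lower plaintext.toList
  let s := s0 ++ List.replicate (PySem.Int.mod (-(PySem.List.len s0)) 5).toNat ' '
  (PySem.List.pyRange 0 (PySem.List.len s) 5).map
    (fun i => encodeGroup (PySem.List.slice s (some i) (some (i + 5))))

-- ===== PRECONDITION & SPEC =====
def Spec_encoding_plaintext (plaintext : String) (out : List Int) : Prop := out = encoding_plaintext_alt plaintext
instance (plaintext : String) (out : List Int) : Decidable (Spec_encoding_plaintext plaintext out) := by unfold Spec_encoding_plaintext; infer_instance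

-- ===== CLAIM (what is proved, stated in full; the proofs are below) =====
def Claim_equal_encoding_plaintext : Prop := ∀ (plaintext : String), Dom_encoding_plaintext plaintext → Spec_encoding_plaintext plaintext (encoding_plaintext plaintext)

-- ===== LEMMAS AND PROOFS =====

-- the while-padding equals the closed-form pad
theorem padWhile_eq (fuel : Nat) (s : List Char) (hf : (5 - s.length % 5) % 5 ≤ fuel) :
    padWhile fuel s = s ++ List.replicate ((5 - s.length % 5) % 5) ' ' := by
  induction fuel generalizing s with
  | zero =>
      have h0 : s.length % 5 = 0 := by omega
      simp [padWhile, h0]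
  | succ f ih =>
      by_cases hc : s.length % 5 = 0
      · simp [padWhile, hc]
      · rw [padWhile, if_pos (by simpa using hc), ih]
        · have hlen : (s ++ [' ']).length = s.length + 1 := by simp
          rw [hlen]
          have : (5 - s.length % 5) % 5 = (5 - (s.length + 1) % 5) % 5 + 1 := by omega
          rw [this, List.replicate_succ, List.append_assoc]
          rfl
        · have hlen : (s ++ [' ']).length = s.length + 1 := by simp
          rw [hlen]; omega

-- Horner = power-weighted sum on a group of exactly 5 characters
theorem group_sum_eq_horner (g : List Char) (h : g.length = 5) :
    ((PySem.List.enumerate g 0).map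
      (fun ic => encode_text ic.2 * (37 : Int) ^ (4 - ic.1).toNat)).sum
    = encodeGroup g := by
  match g, h with
  | [a, b, c, d, e], _ =>
    simp [PySem.List.enumerate, encodeGroup]
    ring

-- ===== VERDICT (by name: the statement is the Claim_ definition above) =====
theorem encoding_plaintext_spec : Claim_equal_encoding_plaintext := by
  intro plaintext _
  unfold Spec_encoding_plaintext encoding_plaintext encoding_plaintext_alt
  set t := PySem.Chars.lower plaintext.toList with ht
  have hpadnum : (PySem.Int.mod (-(PySem.List.len t)) 5).toNat = (5 - t.length % 5) % 5 := by
    rw [PySem.Int.mod_eq_emod_of_pos (by omega)]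
    simp only [PySem.List.len_eq]
    omega
  have hpad : padWhile 5 t = t ++ List.replicate (PySem.Int.mod (-(PySem.List.len t)) 5).toNat ' ' := by
    rw [hpadnum, padWhile_eq 5 t (by omega)]
  rw [hpad]
  set p := t ++ List.replicate (PySem.Int.mod (-(PySem.List.len t)) 5).toNat ' ' with hp
  have hmod : p.length % 5 = 0 := by
    have : p.length = t.length + (PySem.Int.mod (-(PySem.List.len t)) 5).toNat := by simp [hp]
    rw [this, hpadnum]; omega
  rw [PySem.List.foldl_append_singleton_eq_map]
  simp only [List.nil_append]
  apply List.map_congr_left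
  intro i hi
  rw [← hp]
  have hi' := ((PySem.List.mem_pyRange_iff_of_pos (by omega) i)).mp hi
  simp only [PySem.List.len_eq] at hi'
  obtain ⟨h0, hlt, hdvd⟩ := hi'
  have hslice : PySem.List.slice p (some i) (some (i + 5)) = (p.drop i.toNat).take 5 := by
    rw [PySem.List.slice_toNat p h0 (by omega)]
    congr 1
    omega
  have hlen5 : ((p.drop i.toNat).take 5).length = 5 := by
    simp only [List.length_take, List.length_drop]
    omega
  rw [hslice, group_sum_eq_horner _ hlen5]
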